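-- pv_equiv track=rewrite | github.com/sandywhat2eat/options_v4 | core/exit_manager.py | _categorize_strategy
-- ===== SOURCE A (Python) =====
-- def _categorize_strategy(strategy_name: str) -> str:
--     """Categorize strategy for exit management"""
--     strategy_categories = {
--         'directional': [
--             'Long Call', 'Long Put', 'Bull Call Spread', 'Bear Call Spread',
--             'Bull Put Spread', 'Bear Put Spread'
--         ],
--         'neutral': [
--             'Iron Condor', 'Iron Butterfly', 'Butterfly Spread',
--             'Short Straddle', 'Short Strangle'
--         ],
--         'volatility': [
--             'Long Straddle', 'Long Strangle'
--         ],
--         'income': [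
--             'Cash-Secured Put', 'Covered Call', 'Jade Lizard'
--         ],
--         'advanced': [
--             'Calendar Spread', 'Diagonal Spread', 'Call Ratio Spread',
--             'Put Ratio Spread', 'Broken Wing Butterfly'
--         ]
--     }
--
--     for category, strategies in strategy_categories.items():
--         if strategy_name in strategies:
--             return category
--
--     return 'neutral'  # Default
-- ===== SOURCE B (Python) =====
-- # B: one pre-built inverted index (strategy name -> category), single dict lookup; no loop over categories.
-- _STRATEGY_CATEGORY = {
--     'Long Call': 'directional', 'Long Put': 'directional',
--     'Bull Call Spread': 'directional', 'Bear Call Spread': 'directional',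
--     'Bull Put Spread': 'directional', 'Bear Put Spread': 'directional',
--     'Iron Condor': 'neutral', 'Iron Butterfly': 'neutral',
--     'Butterfly Spread': 'neutral', 'Short Straddle': 'neutral',
--     'Short Strangle': 'neutral',
--     'Long Straddle': 'volatility', 'Long Strangle': 'volatility',
--     'Cash-Secured Put': 'income', 'Covered Call': 'income',
--     'Jade Lizard': 'income',
--     'Calendar Spread': 'advanced', 'Diagonal Spread': 'advanced',
--     'Call Ratio Spread': 'advanced', 'Put Ratio Spread': 'advanced',
--     'Broken Wing Butterfly': 'advanced',
-- }
--
-- def _categorize_strategy(strategy_name: str) -> str: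
--     """Categorize strategy for exit management"""
--     return _STRATEGY_CATEGORY.get(strategy_name, 'neutral')
-- ===== Notes on version B (the rewrite author's own statement) =====
-- stated objective: idiomatic
-- what changed: Replaced the per-call category->list loop with per-category membership tests by a pre-built inverted dict (strategy name -> category) and a single .get lookup with default 'neutral'.
import Mathlib
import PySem

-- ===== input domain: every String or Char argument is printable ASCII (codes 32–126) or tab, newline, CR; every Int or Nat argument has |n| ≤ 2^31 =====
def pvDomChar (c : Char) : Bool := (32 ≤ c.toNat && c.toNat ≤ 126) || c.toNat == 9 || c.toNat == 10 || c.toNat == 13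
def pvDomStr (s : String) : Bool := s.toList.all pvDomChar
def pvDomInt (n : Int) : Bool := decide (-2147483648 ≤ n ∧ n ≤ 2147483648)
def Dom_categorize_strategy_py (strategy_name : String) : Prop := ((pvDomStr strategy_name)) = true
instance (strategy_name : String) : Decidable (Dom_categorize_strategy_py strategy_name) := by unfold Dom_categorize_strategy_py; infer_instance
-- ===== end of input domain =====

-- B replaces A's loop over a category->list dict (with per-category membership tests) by a
-- pre-built inverted index (strategy name -> category) and a single lookup with default 'neutral'.


-- ===== PORT A =====
-- the category -> strategies dict, in insertion order
def pvStrategyCategories : List (String × List String) :=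
  [ ("directional", ["Long Call", "Long Put", "Bull Call Spread", "Bear Call Spread",
      "Bull Put Spread", "Bear Put Spread"]),
    ("neutral", ["Iron Condor", "Iron Butterfly", "Butterfly Spread",
      "Short Straddle", "Short Strangle"]),
    ("volatility", ["Long Straddle", "Long Strangle"]),
    ("income", ["Cash-Secured Put", "Covered Call", "Jade Lizard"]),
    ("advanced", ["Calendar Spread", "Diagonal Spread", "Call Ratio Spread",
      "Put Ratio Spread", "Broken Wing Butterfly"]) ]

-- the 'for category, strategies in ...items(): if strategy_name in strategies: return category' loop
def pvScanCategories (items : List (String × List String)) (strategy_name : String) : String :=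
  match items with
  | [] => "neutral"  -- default
  | (category, strategies) :: rest =>
      if strategies.contains strategy_name then category
      else pvScanCategories rest strategy_name

def categorize_strategy_py (strategy_name : String) : String :=
  pvScanCategories pvStrategyCategories strategy_name

-- ===== PORT B =====
-- the pre-built inverted index _STRATEGY_CATEGORY (a dict literal, insertion order)
def pvStrategyCategoryIndex : PySem.Dict String String :=
  PySem.Dict.ofList [ ("Long Call", "directional"), ("Long Put", "directional"),
    ("Bull Call Spread", "directional"), ("Bear Call Spread", "directional"),
    ("Bull Put Spread", "directional"), ("Bear Put Spread", "directional"),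
    ("Iron Condor", "neutral"), ("Iron Butterfly", "neutral"),
    ("Butterfly Spread", "neutral"), ("Short Straddle", "neutral"),
    ("Short Strangle", "neutral"),
    ("Long Straddle", "volatility"), ("Long Strangle", "volatility"),
    ("Cash-Secured Put", "income"), ("Covered Call", "income"),
    ("Jade Lizard", "income"),
    ("Calendar Spread", "advanced"), ("Diagonal Spread", "advanced"),
    ("Call Ratio Spread", "advanced"), ("Put Ratio Spread", "advanced"),
    ("Broken Wing Butterfly", "advanced") ]

def categorize_strategy_py_alt (strategy_name : String) : String :=
  PySem.Dict.getD pvStrategyCategoryIndex strategy_name "neutral"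

-- ===== PRECONDITION & SPEC =====
def Spec_categorize_strategy_py (strategy_name : String) (out : String) : Prop := out = categorize_strategy_py_alt strategy_name
instance (strategy_name : String) (out : String) : Decidable (Spec_categorize_strategy_py strategy_name out) := by unfold Spec_categorize_strategy_py; infer_instance

-- ===== CLAIM (what is proved, stated in full; the proofs are below) =====
def Claim_equal_categorize_strategy_py : Prop := ∀ (strategy_name : String), Dom_categorize_strategy_py strategy_name → Spec_categorize_strategy_py strategy_name (categorize_strategy_py strategy_name)

-- ===== LEMMAS AND PROOFS =====

-- the literal dict's insertion-order build (Dict.ofList) is exactly its item list (all keys distinct)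
theorem pvIndex_eq_mk : pvStrategyCategoryIndex = PySem.Dict.mk
  [ ("Long Call", "directional"), ("Long Put", "directional"),
    ("Bull Call Spread", "directional"), ("Bear Call Spread", "directional"),
    ("Bull Put Spread", "directional"), ("Bear Put Spread", "directional"),
    ("Iron Condor", "neutral"), ("Iron Butterfly", "neutral"),
    ("Butterfly Spread", "neutral"), ("Short Straddle", "neutral"),
    ("Short Strangle", "neutral"),
    ("Long Straddle", "volatility"), ("Long Strangle", "volatility"),
    ("Cash-Secured Put", "income"), ("Covered Call", "income"),
    ("Jade Lizard", "income"),
    ("Calendar Spread", "advanced"), ("Diagonal Spread", "advanced"),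
    ("Call Ratio Spread", "advanced"), ("Put Ratio Spread", "advanced"),
    ("Broken Wing Butterfly", "advanced") ] := rfl

-- ===== VERDICT (by name: the statement is the Claim_ definition above) =====
set_option maxHeartbeats 2000000 in
theorem categorize_strategy_py_spec : Claim_equal_categorize_strategy_py := by
  intro s _
  unfold Spec_categorize_strategy_py categorize_strategy_py categorize_strategy_py_alt
  rw [pvIndex_eq_mk]
  by_cases h1 : s = "Long Call"
  · subst h1; rfl
  by_cases h2 : s = "Long Put"
  · subst h2; rfl
  by_cases h3 : s = "Bull Call Spread"
  · subst h3; rfl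
  by_cases h4 : s = "Bear Call Spread"
  · subst h4; rfl
  by_cases h5 : s = "Bull Put Spread"
  · subst h5; rfl
  by_cases h6 : s = "Bear Put Spread"
  · subst h6; rfl
  by_cases h7 : s = "Iron Condor"
  · subst h7; rfl
  by_cases h8 : s = "Iron Butterfly"
  · subst h8; rfl
  by_cases h9 : s = "Butterfly Spread"
  · subst h9; rfl
  by_cases h10 : s = "Short Straddle"
  · subst h10; rfl
  by_cases h11 : s = "Short Strangle"
  · subst h11; rfl
  by_cases h12 : s = "Long Straddle"
  · subst h12; rfl
  by_cases h13 : s = "Long Strangle"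
  · subst h13; rfl
  by_cases h14 : s = "Cash-Secured Put"
  · subst h14; rfl
  by_cases h15 : s = "Covered Call"
  · subst h15; rfl
  by_cases h16 : s = "Jade Lizard"
  · subst h16; rfl
  by_cases h17 : s = "Calendar Spread"
  · subst h17; rfl
  by_cases h18 : s = "Diagonal Spread"
  · subst h18; rfl
  by_cases h19 : s = "Call Ratio Spread"
  · subst h19; rfl
  by_cases h20 : s = "Put Ratio Spread"
  · subst h20; rfl
  by_cases h21 : s = "Broken Wing Butterfly"
  · subst h21; rfl
  simp only [pvScanCategories, pvStrategyCategories, List.contains_cons, List.contains_nil,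
    Bool.or_false, Bool.or_eq_true, beq_iff_eq, PySem.Dict.getD_eq_get?_getD,
    PySem.Dict.get?_mk_cons, eq_comm (b := s), h1, h2, h3, h4, h5, h6, h7, h8, h9, h10, h11, h12, h13, h14, h15, h16, h17, h18, h19, h20, h21,
    or_self, if_false]
  rfl
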